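-- pv_equiv track=rewrite | github.com/ImJehtts/Spotify_PersonalWrap | main.py | formating_artists
-- ===== SOURCE A (Python) =====
-- def formating_artists(artists_names):
--    artists = artists_names.split(', ')
--    final_string = ""
--    for i, artist in enumerate(artists):
--        final_string += artist
--        if i < len(artists) - 1 and i % 2 == 1:
--            final_string += "\n"
--        else:
--            final_string += ", "
--
--    return final_string.rstrip(', '), len(artists)
-- ===== SOURCE B (Python) =====
-- def formating_artists(artists_names):
--     artists = artists_names.split(', ')
--     lines = []
--     i = 0
--     while i < len(artists):
--         lines.append(', '.join(artists[i:i+2]))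
--         i += 2
--     return '\n'.join(lines).rstrip(', '), len(artists)
-- ===== Notes on version B (the rewrite author's own statement) =====
-- stated objective: simpler
-- what changed: Replaces the per-element index-parity accumulation loop with chunking the split list into pairs, joining each pair and then the lines (same final rstrip).
import Mathlib
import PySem

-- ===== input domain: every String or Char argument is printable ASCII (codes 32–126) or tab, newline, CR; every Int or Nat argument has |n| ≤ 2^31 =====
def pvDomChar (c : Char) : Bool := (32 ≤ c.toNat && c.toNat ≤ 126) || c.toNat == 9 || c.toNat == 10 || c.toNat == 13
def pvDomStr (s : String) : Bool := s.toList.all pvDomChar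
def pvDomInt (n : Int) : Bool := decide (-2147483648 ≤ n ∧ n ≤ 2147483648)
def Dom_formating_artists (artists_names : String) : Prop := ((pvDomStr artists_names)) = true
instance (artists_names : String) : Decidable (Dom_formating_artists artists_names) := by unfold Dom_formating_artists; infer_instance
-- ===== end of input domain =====

-- B replaces A's per-element index-parity accumulation loop by chunking the split list into
-- pairs, joining each pair with ', ' and the lines with '\n' (same final rstrip); simpler decomposition.

-- hand port of Python's s.rstrip(', '): drop ','/' ' characters from the right (exact: rstrip
-- with a chars argument removes the maximal suffix of characters from that set)
def pvRstrip (cs : List Char) : List Char :=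
  (cs.reverse.dropWhile (fun c => c == ',' || c == ' ')).reverse

-- ===== PORT A =====
def formating_artists (artists_names : String) : String × Int :=
  let artists := PySem.Chars.splitOn artists_names.toList [',', ' ']
  let final_string := (PySem.List.enumerate artists 0).foldl
    (fun fs p =>
      let fs := fs ++ p.2
      if p.1 < (artists.length : Int) - 1 ∧ PySem.Int.mod p.1 2 = 1
      then fs ++ ['\n'] else fs ++ [',', ' ']) []
  (String.ofList (pvRstrip final_string), (artists.length : Int))

-- ===== PORT B =====
-- the while loop of Source B: consume the remaining artist list two at a time
-- (artists[i:i+2]), appending the ', '-join of each chunk as one line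
def pvChunkLines : List (List Char) → List (List Char)
  | [] => []
  | [a] => [PySem.Chars.join [',', ' '] [a]]
  | a :: b :: rest => PySem.Chars.join [',', ' '] [a, b] :: pvChunkLines rest

def formating_artists_alt (artists_names : String) : String × Int :=
  let artists := PySem.Chars.splitOn artists_names.toList [',', ' ']
  (String.ofList (pvRstrip (PySem.Chars.join ['\n'] (pvChunkLines artists))), (artists.length : Int))

-- ===== PRECONDITION & SPEC =====
def Spec_formating_artists (artists_names : String) (out : String × Int) : Prop := out = formating_artists_alt artists_names
instance (artists_names : String) (out : String × Int) : Decidable (Spec_formating_artists artists_names out) := by unfold Spec_formating_artists; infer_instance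

-- ===== CLAIM (what is proved, stated in full; the proofs are below) =====
def Claim_equal_formating_artists : Prop := ∀ (artists_names : String), Dom_formating_artists artists_names → Spec_formating_artists artists_names (formating_artists artists_names)

-- ===== LEMMAS AND PROOFS =====

-- A's loop body, named (definitionally the lambda in the port of A)
def pvStep (n : Int) (fs : List Char) (p : Int × List Char) : List Char :=
  let fs := fs ++ p.2
  if p.1 < n - 1 ∧ PySem.Int.mod p.1 2 = 1 then fs ++ ['\n'] else fs ++ [',', ' ']

lemma pvStep_comma_of_mod (n : Int) (fs x : List Char) (i : Int)
    (hm : i % 2 = 0) : pvStep n fs (i, x) = fs ++ x ++ [',', ' '] := by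
  have hc : ¬ (i < n - 1 ∧ PySem.Int.mod i 2 = 1) := by
    rw [PySem.Int.mod_eq_emod_of_pos (by norm_num)]; omega
  simp only [pvStep]
  rw [if_neg hc]

lemma pvStep_comma_of_last (n : Int) (fs x : List Char) (i : Int)
    (h2 : ¬ i < n - 1) : pvStep n fs (i, x) = fs ++ x ++ [',', ' '] := by
  simp [pvStep, h2]

lemma pvStep_newline (n : Int) (fs x : List Char) (i : Int)
    (h2 : i < n - 1) (hm : i % 2 = 1) : pvStep n fs (i, x) = fs ++ x ++ ['\n'] := by
  have hc : i < n - 1 ∧ PySem.Int.mod i 2 = 1 := by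
    rw [PySem.Int.mod_eq_emod_of_pos (by norm_num)]; omega
  simp only [pvStep]
  rw [if_pos hc]

lemma pvChunkLines_ne_nil (a : List Char) (rest : List (List Char)) :
    pvChunkLines (a :: rest) ≠ [] := by
  cases rest with
  | nil => simp [pvChunkLines]
  | cons b r => simp [pvChunkLines]

lemma pvRstrip_append (x : List Char) : pvRstrip (x ++ [',', ' ']) = pvRstrip x := by
  simp [pvRstrip, List.dropWhile]

-- A's loop, started at an even index s with accumulator acc and n = s + (remaining length),
-- produces acc ++ (B's chunk-joined string) ++ ", "
lemma loopA_eq (as : List (List Char)) (n : Int) (s : Int) (acc : List Char)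
    (hs : s % 2 = 0) (hn : s + as.length = n) (hne : as ≠ []) :
    (PySem.List.enumerate as s).foldl (pvStep n) acc
    = acc ++ PySem.Chars.join ['\n'] (pvChunkLines as) ++ [',', ' '] := by
  induction as using pvChunkLines.induct generalizing s acc with
  | case1 => exact absurd rfl hne
  | case2 a =>
    simp only [List.length_cons, List.length_nil] at hn
    rw [PySem.List.enumerate_cons, PySem.List.enumerate_nil]
    rw [List.foldl_cons, List.foldl_nil, pvStep_comma_of_last n acc a s (by omega)]
    simp [pvChunkLines, PySem.Chars.join_singleton]
  | case3 a b rest ih =>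
    have hmods : s % 2 = 0 := hs
    have hmods1 : (s + 1) % 2 = 1 := by omega
    simp only [List.length_cons] at hn
    rw [PySem.List.enumerate_cons, PySem.List.enumerate_cons, List.foldl_cons, List.foldl_cons,
      pvStep_comma_of_mod n acc a s hmods]
    cases rest with
    | nil =>
      rw [pvStep_comma_of_last n _ b (s + 1) (by simp at hn; omega)]
      rw [PySem.List.enumerate_nil, List.foldl_nil]
      simp only [pvChunkLines]
      rw [PySem.Chars.join_singleton, PySem.Chars.join_cons_cons, PySem.Chars.join_singleton]
      simp [List.append_assoc]
    | cons c r =>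
      have h2 : (s + 1 : Int) < n - 1 := by simp at hn; omega
      rw [pvStep_newline n _ b (s + 1) h2 hmods1]
      rw [ih (s + 1 + 1) _ (by omega) (by push_cast at hn; omega) (by simp)]
      obtain ⟨l0, ls, hc⟩ : ∃ l0 ls, pvChunkLines (c :: r) = l0 :: ls := by
        cases hcl : pvChunkLines (c :: r) with
        | nil => exact absurd hcl (pvChunkLines_ne_nil c r)
        | cons l0 ls => exact ⟨l0, ls, rfl⟩
      show _ = acc ++ PySem.Chars.join ['\n'] (pvChunkLines (a :: b :: c :: r)) ++ [',', ' ']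
      simp only [pvChunkLines, hc]
      rw [PySem.Chars.join_cons_cons, PySem.Chars.join_cons_cons, PySem.Chars.join_singleton]
      simp [List.append_assoc]

-- ===== VERDICT (by name: the statement is the Claim_ definition above) =====
theorem formating_artists_spec : Claim_equal_formating_artists := by
  intro s _
  unfold Spec_formating_artists formating_artists formating_artists_alt
  cases h : PySem.Chars.splitOn s.toList [',', ' '] with
  | nil =>
    simp [PySem.List.enumerate_nil, pvChunkLines, PySem.Chars.join, List.intercalate]
  | cons a rest =>
    simp only []
    have hfold : (PySem.List.enumerate (a :: rest) 0).foldl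
        (fun fs p =>
          let fs := fs ++ p.2
          if p.1 < ((a :: rest).length : Int) - 1 ∧ PySem.Int.mod p.1 2 = 1
          then fs ++ ['\n'] else fs ++ [',', ' ']) []
        = [] ++ PySem.Chars.join ['\n'] (pvChunkLines (a :: rest)) ++ [',', ' '] :=
      loopA_eq (a :: rest) ((a :: rest).length : Int) 0 [] (by omega) (by ring) (by simp)
    rw [hfold]
    rw [List.nil_append, pvRstrip_append]
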